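-- pv_equiv track=rewrite | github.com/TomasCostaK/mining_massive_datasets | Assignment1/conditions.py | build_bigram
-- ===== SOURCE A (Python) =====
-- def build_bigram(basket, filtered_diseases):
--     """ Function to build a bigram based on the basket and the diseases with more than the supported threshold
--     """
--     diseases = list(basket[1])
--     list_of_bigrams = []
--     for i in range(len(diseases)):
--         d1 = diseases[i]
--         if d1 not in filtered_diseases: continue
--         for j in range(i+1, len(diseases)):
--             d2 = diseases[j]
--             if d2 not in filtered_diseases: continue
--             list_of_bigrams.append((d1 + "," + d2, 1))
--     return list_of_bigrams
-- ===== SOURCE B (Python) =====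
-- def build_bigram(basket, filtered_diseases):
--     """Single backward pass: walk the basket from the end, keeping the
--     in-filter diseases already seen (`later`, in original order); each kept
--     disease prepends its pair block, so the output is built back-to-front."""
--     later = []
--     result = []
--     for d in reversed(list(basket[1])):
--         if d in filtered_diseases:
--             result = [(d + "," + x, 1) for x in later] + result
--             later = [d] + later
--     return result
-- ===== Notes on version B (the rewrite author's own statement) =====
-- stated objective: faster
-- what changed: B replaces A's forward index-based nested loops with a single backward pass over the basket that maintains the list of in-filter diseases already seen and prepends each disease's pair block, so membership against filtered_diseases is tested once per element instead of once per pair.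
import Mathlib
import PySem

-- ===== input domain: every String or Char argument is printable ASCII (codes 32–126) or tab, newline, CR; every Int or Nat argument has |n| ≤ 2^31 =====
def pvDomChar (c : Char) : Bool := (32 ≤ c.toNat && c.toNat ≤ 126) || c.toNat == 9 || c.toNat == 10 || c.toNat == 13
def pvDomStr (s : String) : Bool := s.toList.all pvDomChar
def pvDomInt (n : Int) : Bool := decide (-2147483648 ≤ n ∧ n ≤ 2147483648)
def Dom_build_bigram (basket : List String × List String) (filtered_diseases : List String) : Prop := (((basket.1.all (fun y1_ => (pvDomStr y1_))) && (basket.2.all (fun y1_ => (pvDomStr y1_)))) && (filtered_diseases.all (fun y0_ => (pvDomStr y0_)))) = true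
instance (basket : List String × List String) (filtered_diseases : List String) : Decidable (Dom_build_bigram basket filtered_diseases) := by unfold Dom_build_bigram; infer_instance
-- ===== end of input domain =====

-- B replaces A's forward index-based double loop by a single backward pass that keeps the
-- in-filter diseases already seen and prepends each pair block (alternative decomposition,
-- same return value).

-- ===== PORT A =====
def build_bigram (basket : List String × List String) (filtered_diseases : List String) : List (String × Int) :=
  let diseases := basket.2
  (PySem.List.pyRange 0 diseases.length 1).foldl (fun acc i =>
    let d1 := PySem.List.pyGetD diseases i ""
    if filtered_diseases.contains d1 then
      (PySem.List.pyRange (i + 1) diseases.length 1).foldl (fun acc2 j =>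
        let d2 := PySem.List.pyGetD diseases j ""
        if filtered_diseases.contains d2 then acc2 ++ [(d1 ++ "," ++ d2, (1 : Int))] else acc2) acc
    else acc) []

-- ===== PORT B =====
-- backward pass: state = (later kept diseases in original order, result so far)
def build_bigram_alt (basket : List String × List String) (filtered_diseases : List String) : List (String × Int) :=
  (basket.2.reverse.foldl (fun (st : List String × List (String × Int)) d =>
    if filtered_diseases.contains d then
      (d :: st.1, st.1.map (fun x => (d ++ "," ++ x, (1 : Int))) ++ st.2)
    else st) ([], [])).2

-- ===== PRECONDITION & SPEC =====
def Spec_build_bigram (basket : List String × List String) (filtered_diseases : List String) (out : List (String × Int)) : Prop := out = build_bigram_alt basket filtered_diseases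
instance (basket : List String × List String) (filtered_diseases : List String) (out : List (String × Int)) : Decidable (Spec_build_bigram basket filtered_diseases out) := by unfold Spec_build_bigram; infer_instance

-- ===== CLAIM (what is proved, stated in full; the proofs are below) =====
def Claim_equal_build_bigram : Prop := ∀ (basket : List String × List String) (filtered_diseases : List String), Dom_build_bigram basket filtered_diseases → Spec_build_bigram basket filtered_diseases (build_bigram basket filtered_diseases)

-- ===== LEMMAS AND PROOFS =====

-- pairs of a list: each element paired with every later element (abstract description both ports meet)
def bbPairs (l : List String) : List (String × Int) :=
  match l with
  | [] => []
  | d :: rest => rest.map (fun d2 => (d ++ "," ++ d2, (1 : Int))) ++ bbPairs rest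

theorem bbPairs_cons (d : String) (l : List String) :
    bbPairs (d :: l) = l.map (fun d2 => (d ++ "," ++ d2, (1 : Int))) ++ bbPairs l := rfl

-- A's double loop over any suffix produces bbPairs of the filtered suffix
theorem bb_outer_char (fd : List String) (ds pre suf : List String) (h : ds = pre ++ suf)
    (acc : List (String × Int)) :
    (PySem.List.pyRange (pre.length : Int) (ds.length : Int) 1).foldl (fun acc i =>
      if fd.contains (PySem.List.pyGetD ds i "") then
        (PySem.List.pyRange (i + 1) (ds.length : Int) 1).foldl (fun acc2 j =>
          if fd.contains (PySem.List.pyGetD ds j "") then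
            acc2 ++ [(PySem.List.pyGetD ds i "" ++ "," ++ PySem.List.pyGetD ds j "", (1 : Int))]
          else acc2) acc
      else acc) acc
    = acc ++ bbPairs (suf.filter (fun d => fd.contains d)) := by
  induction suf generalizing pre acc with
  | nil =>
    subst h
    rw [PySem.List.pyRange_one_eq_nil (by simp)]
    simp [bbPairs]
  | cons d rest ih =>
    subst h
    have hlt : (pre.length : Int) < (((pre ++ d :: rest).length : Nat) : Int) := by
      simp
    rw [PySem.List.pyRange_one_cons hlt]
    simp only [List.foldl_cons]
    have hget : PySem.List.pyGetD (pre ++ d :: rest) (pre.length : Int) "" = d := by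
      simp
    have hcast : ((pre.length : Int) + 1) = (((pre ++ [d]).length : Nat) : Int) := by
      simp
    have hdrop : (pre ++ d :: rest).drop ((pre ++ [d]).length) = rest := by
      simp
    have hinner : ∀ acc' : List (String × Int),
        (PySem.List.pyRange (((pre ++ [d]).length : Nat) : Int) (((pre ++ d :: rest).length : Nat) : Int) 1).foldl
          (fun acc2 j =>
            if fd.contains (PySem.List.pyGetD (pre ++ d :: rest) j "") then
              acc2 ++ [(d ++ "," ++ PySem.List.pyGetD (pre ++ d :: rest) j "", (1 : Int))]
            else acc2) acc'
        = acc' ++ (rest.filter (fun d2 => fd.contains d2)).map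
            (fun d2 => (d ++ "," ++ d2, (1 : Int))) := by
      intro acc'
      rw [PySem.List.foldl_pyRange_pyGetD' (pre ++ d :: rest) ""
            (fun acc2 d2 => if fd.contains d2 then acc2 ++ [(d ++ "," ++ d2, (1 : Int))] else acc2)
            acc' (by omega)]
      rw [Int.toNat_natCast, hdrop]
      exact PySem.List.foldl_append_if _ _ _ _
    have hrec := ih (pre ++ [d]) (by simp)
    simp only [hget, hcast]
    by_cases hd : fd.contains d
    · rw [if_pos hd, hinner, hrec]
      rw [List.filter_cons_of_pos hd, bbPairs_cons, List.append_assoc]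
    · rw [if_neg hd, hrec, List.filter_cons_of_neg hd]

-- B's backward pass: the state after consuming a list (from the right) is
-- (filtered list, bbPairs of the filtered list)
theorem bb_back_char (fd : List String) (l : List String) :
    l.reverse.foldl (fun (st : List String × List (String × Int)) d =>
      if fd.contains d then
        (d :: st.1, st.1.map (fun x => (d ++ "," ++ x, (1 : Int))) ++ st.2)
      else st) ([], [])
    = (l.filter (fun d => fd.contains d), bbPairs (l.filter (fun d => fd.contains d))) := by
  rw [List.foldl_reverse]
  induction l with
  | nil => simp [bbPairs]
  | cons d rest ih =>
    simp only [List.foldr_cons, ih]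
    by_cases hd : fd.contains d
    · rw [if_pos hd, List.filter_cons_of_pos hd, bbPairs_cons]
    · rw [if_neg hd, List.filter_cons_of_neg hd]

-- ===== VERDICT (by name: the statement is the Claim_ definition above) =====
theorem build_bigram_spec : Claim_equal_build_bigram := by
  intro basket fd _
  show build_bigram basket fd = build_bigram_alt basket fd
  unfold build_bigram build_bigram_alt
  rw [bb_back_char]
  have h := bb_outer_char fd basket.2 [] basket.2 rfl []
  simpa using h
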